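-- pv_equiv track=rewrite | github.com/gnanakkumaar/CC-Censor-Dispenser | censor_dispenser.py | censor_one_word
-- ===== SOURCE A (Python) =====
-- def censor_one_word(word):
--     censored = ''
--     i = 0
--     while i < len(word):
--         #converting censor word in censoring character / in this case *
--         if word[i] == ' ':
--             censored += word[i]
--         else:
--             censored += '*'
--         i += 1
--     return censored
-- ===== SOURCE B (Python) =====
-- def censor_one_word(word):
--     # split on single spaces, blank out each segment, rejoin: spaces are
--     # reconstructed from the split boundaries instead of tested per character
--     return ' '.join('*' * len(tok) for tok in word.split(' '))
-- ===== Notes on version B (the rewrite author's own statement) =====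
-- stated objective: idiomatic
-- what changed: Replaces the index-driven per-character while loop and string concatenation with a split(' ') / '*'*len / ' '.join pass that rebuilds spaces from split boundaries.
import Mathlib
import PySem

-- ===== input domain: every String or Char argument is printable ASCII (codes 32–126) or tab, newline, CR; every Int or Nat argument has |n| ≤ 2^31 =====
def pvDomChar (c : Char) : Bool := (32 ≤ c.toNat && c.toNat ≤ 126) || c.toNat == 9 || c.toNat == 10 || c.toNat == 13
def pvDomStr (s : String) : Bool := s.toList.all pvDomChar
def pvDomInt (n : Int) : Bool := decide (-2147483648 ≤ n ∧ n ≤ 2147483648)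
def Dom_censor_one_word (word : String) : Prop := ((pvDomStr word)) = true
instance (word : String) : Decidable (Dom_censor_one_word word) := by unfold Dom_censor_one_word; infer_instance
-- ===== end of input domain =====

-- B rebuilds the censored string by splitting on spaces, blanking each segment and
-- rejoining with spaces, instead of A's per-character while loop (objective: idiomatic).

-- ===== PORT A =====
-- while loop over indices 0..len-1, appending ' ' or '*' per character,
-- ported as a fold over the character list carrying the accumulated output
def censor_one_word (word : String) : String :=
  String.mk (word.toList.foldl (fun censored c => censored ++ [if c = ' ' then c else '*']) [])

-- ===== PORT B =====
-- ' '.join('*' * len(tok) for tok in word.split(' ')); split(' ') on a single-char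
-- separator is List.splitOn ' ' (keeps empties), ' '.join is intercalate [' ']
def censor_one_word_alt (word : String) : String :=
  String.mk (List.intercalate [' ']
    ((word.toList.splitOn ' ').map (fun tok => List.replicate tok.length '*')))

-- ===== PRECONDITION & SPEC =====
def Spec_censor_one_word (word : String) (out : String) : Prop := out = censor_one_word_alt word
instance (word : String) (out : String) : Decidable (Spec_censor_one_word word out) := by unfold Spec_censor_one_word; infer_instance

-- ===== CLAIM (what is proved, stated in full; the proofs are below) =====
def Claim_equal_censor_one_word : Prop := ∀ (word : String), Dom_censor_one_word word → Spec_censor_one_word word (censor_one_word word)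

-- ===== LEMMAS AND PROOFS =====

-- joining with a single space distributes over the head segment
theorem inter_cons_cons (x y : List Char) (l : List (List Char)) :
    List.intercalate [' '] (x :: y :: l) = x ++ ' ' :: List.intercalate [' '] (y :: l) := by
  simp [List.intercalate, List.intersperse]

theorem censor_intercalate_splitOn (cs : List Char) :
    List.intercalate [' '] ((cs.splitOn ' ').map (fun tok => List.replicate tok.length '*'))
      = cs.map (fun c => if c = ' ' then c else '*') := by
  simp only [List.splitOn]
  induction cs with
  | nil => simp [List.intercalate]
  | cons c cs ih =>
    obtain ⟨t, l, ht⟩ : ∃ t l, cs.splitOnP (· == ' ') = t :: l := by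
      cases h : cs.splitOnP (· == ' ') with
      | nil => exact absurd h (List.splitOnP_ne_nil _ cs)
      | cons t l => exact ⟨t, l, rfl⟩
    rw [List.splitOnP_cons]
    rw [ht] at ih ⊢
    by_cases hc : c = ' '
    · simp only [List.map_cons] at ih
      simp only [hc, if_pos, beq_self_eq_true, List.map_cons, List.replicate_zero,
        List.length_nil, inter_cons_cons, List.nil_append, ih]
    · have hb : (c == ' ') = false := by simp [hc]
      simp only [hb, Bool.false_eq_true, if_false, List.modifyHead, List.map_cons,
        List.length_cons, List.replicate_succ]
      cases l with
      | nil => simp only [List.map_nil, List.intercalate] at ih ⊢; simp_all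
      | cons u l' =>
        simp only [List.map_cons, inter_cons_cons] at ih ⊢
        simp_all

theorem censor_one_word_eq (word : String) :
    censor_one_word word = censor_one_word_alt word := by
  unfold censor_one_word censor_one_word_alt
  rw [censor_intercalate_splitOn, PySem.List.foldl_append_singleton_eq_map, List.nil_append]

-- ===== VERDICT (by name: the statement is the Claim_ definition above) =====
theorem censor_one_word_spec : Claim_equal_censor_one_word := by
  intro word _
  exact censor_one_word_eq word
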